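-- pv_equiv track=rewrite | github.com/arunsurya22/itp-w1-create-box | create_box/main.py | empty_box
-- ===== SOURCE A (Python) =====
-- def empty_box(height, width, character):
--     gap = " "
--     final_answer = ''
--     for row in range(height):
--         if row == 0 or row == height-1:
--            final_answer += width * character + '\n'
--         else:
--            final_answer += (character + (gap*(width-2)) + character + '\n')
--     return final_answer
-- ===== SOURCE B (Python) =====
-- def empty_box(height, width, character):
--     if height <= 0:
--         return ''
--     top = width * character + '\n'
--     if height == 1:
--         return top
--     mid = character + ' ' * (width - 2) + character + '\n'
--     return top + mid * (height - 2) + top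
-- ===== Notes on version B (the rewrite author's own statement) =====
-- stated objective: simpler
-- what changed: Replaces A's per-row loop with two precomputed row strings and string multiplication: top + mid*(height-2) + top, with direct returns for height<=0 and height==1.
import Mathlib
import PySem

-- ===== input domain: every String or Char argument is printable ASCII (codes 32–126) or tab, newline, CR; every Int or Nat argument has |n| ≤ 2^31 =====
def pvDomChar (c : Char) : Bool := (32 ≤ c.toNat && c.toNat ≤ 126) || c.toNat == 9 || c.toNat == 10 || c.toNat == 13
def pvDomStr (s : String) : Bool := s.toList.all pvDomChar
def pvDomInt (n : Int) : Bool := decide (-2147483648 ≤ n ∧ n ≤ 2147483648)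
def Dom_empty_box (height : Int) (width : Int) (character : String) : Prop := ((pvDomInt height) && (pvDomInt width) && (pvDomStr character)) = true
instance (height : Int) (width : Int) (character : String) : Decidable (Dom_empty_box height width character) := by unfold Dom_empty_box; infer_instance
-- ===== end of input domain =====

-- B replaces A's per-row loop by two precomputed row strings and string multiplication
-- (top + mid*(height-2) + top); equivalence of return values is proved below.

-- ===== PORT A =====
-- literal port of A: a fold over range(height) appending one row per iteration
def empty_box (height : Int) (width : Int) (character : String) : String :=
  let gap : List Char := " ".toList
  String.ofList <|
    (PySem.List.pyRange 0 height).foldl (fun final_answer row =>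
      if row = 0 ∨ row = height - 1 then
        final_answer ++ (PySem.List.pyRepeat character.toList width ++ ['\n'])
      else
        final_answer ++ (character.toList ++ PySem.List.pyRepeat gap (width - 2)
                          ++ character.toList ++ ['\n'])) []

-- ===== PORT B =====
-- literal port of B: precompute the two row strings, multiply the middle one
def empty_box_alt (height : Int) (width : Int) (character : String) : String :=
  if height ≤ 0 then ""
  else
    let top : List Char := PySem.List.pyRepeat character.toList width ++ ['\n']
    if height = 1 then String.ofList top
    else
      let mid : List Char := character.toList ++ PySem.List.pyRepeat " ".toList (width - 2)
                              ++ character.toList ++ ['\n']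
      String.ofList (top ++ PySem.List.pyRepeat mid (height - 2) ++ top)

-- ===== PRECONDITION & SPEC =====
def Spec_empty_box (height : Int) (width : Int) (character : String) (out : String) : Prop := out = empty_box_alt height width character
instance (height : Int) (width : Int) (character : String) (out : String) : Decidable (Spec_empty_box height width character out) := by unfold Spec_empty_box; infer_instance

-- ===== CLAIM (what is proved, stated in full; the proofs are below) =====
def Claim_equal_empty_box : Prop := ∀ (height : Int) (width : Int) (character : String), Dom_empty_box height width character → Spec_empty_box height width character (empty_box height width character)

-- ===== LEMMAS AND PROOFS =====

theorem foldl_congr_fun {α β : Type} (f g : β → α → β) (l : List α) (acc : β)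
    (h : ∀ a x, x ∈ l → f a x = g a x) : l.foldl f acc = l.foldl g acc := by
  induction l generalizing acc with
  | nil => rfl
  | cons a t ih =>
      simp only [List.foldl_cons]
      rw [h acc a List.mem_cons_self]
      exact ih _ (fun b x hx => h b x (List.mem_cons_of_mem a hx))

-- A's loop body 'if P then acc ++ X else acc ++ Y' is 'acc ++ (if P then X else Y)'
theorem foldl_ite_append {α β : Type} (P : α → Prop) [DecidablePred P]
    (X Y : List β) (l : List α) (acc : List β) :
    l.foldl (fun a x => if P x then a ++ X else a ++ Y) acc
      = l.foldl (fun a x => a ++ (if P x then X else Y)) acc := by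
  apply foldl_congr_fun
  intro a x _
  split_ifs <;> rfl

theorem flatMap_const_mid {α β : Type} (P : α → Prop) [DecidablePred P]
    (X Y : List β) (l : List α) (h : ∀ x ∈ l, ¬ P x) :
    l.flatMap (fun x => if P x then X else Y) = (List.replicate l.length Y).flatten := by
  induction l with
  | nil => rfl
  | cons a t ih =>
      simp only [List.flatMap_cons, List.length_cons, List.replicate_succ, List.flatten_cons]
      rw [if_neg (h a (List.mem_cons_self)), ih (fun x hx => h x (List.mem_cons_of_mem a hx))]

theorem empty_box_eq_alt (height width : Int) (character : String) :
    empty_box height width character = empty_box_alt height width character := by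
  have hbody :
      (PySem.List.pyRange 0 height).foldl (fun final_answer row =>
        if row = 0 ∨ row = height - 1 then
          final_answer ++ (PySem.List.pyRepeat character.toList width ++ ['\n'])
        else
          final_answer ++ (character.toList ++ PySem.List.pyRepeat " ".toList (width - 2)
                            ++ character.toList ++ ['\n'])) []
      = (PySem.List.pyRange 0 height).flatMap
          (fun row => if row = 0 ∨ row = height - 1 then
              PySem.List.pyRepeat character.toList width ++ ['\n']
            else
              character.toList ++ PySem.List.pyRepeat " ".toList (width - 2)
                ++ character.toList ++ ['\n']) := by
    rw [foldl_ite_append (fun row => row = 0 ∨ row = height - 1)]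
    rw [PySem.List.foldl_append_eq_flatMap]
    simp
  simp only [empty_box, empty_box_alt]
  rw [hbody]
  rcases le_or_gt height 0 with h0 | h0
  · rw [PySem.List.pyRange_one_eq_nil h0, if_pos h0]
    rfl
  · rw [if_neg (by omega)]
    by_cases h1 : height = 1
    · subst h1
      rw [if_pos rfl, show PySem.List.pyRange 0 1 = [0] from by decide]
      simp
    · rw [if_neg h1]
      have h2 : (2:Int) ≤ height := by omega
      have e1 : PySem.List.pyRange 1 height
          = PySem.List.pyRange 1 (height - 1) ++ [height - 1] := by
        have e := PySem.List.pyRange_one_succ_right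
          (a := 1) (b := height - 1) (by omega)
        rwa [show height - 1 + 1 = height from by omega] at e
      have hsplit : PySem.List.pyRange 0 height
          = 0 :: (PySem.List.pyRange 1 (height - 1) ++ [height - 1]) := by
        rw [PySem.List.pyRange_one_cons (by omega : (0:Int) < height),
            show (0:Int) + 1 = 1 from rfl, e1]
      rw [hsplit]
      simp only [List.flatMap_cons, List.flatMap_append, List.flatMap_nil]
      simp only [true_or, or_true, if_true]
      have hmidpart : (PySem.List.pyRange 1 (height - 1)).flatMap
          (fun row => if row = 0 ∨ row = height - 1 then
              PySem.List.pyRepeat character.toList width ++ ['\n']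
            else
              character.toList ++ PySem.List.pyRepeat " ".toList (width - 2)
                ++ character.toList ++ ['\n'])
          = PySem.List.pyRepeat (character.toList
              ++ PySem.List.pyRepeat " ".toList (width - 2)
              ++ character.toList ++ ['\n']) (height - 2) := by
        rw [flatMap_const_mid (fun row => row = 0 ∨ row = height - 1) _ _ _ ?_]
        · rw [PySem.List.pyRepeat, PySem.List.length_pyRange_one]
          congr 2
          omega
        · intro x hx
          rw [PySem.List.mem_pyRange_one] at hx
          omega
      rw [hmidpart]
      simp

-- ===== VERDICT (by name: the statement is the Claim_ definition above) =====
theorem empty_box_spec : Claim_equal_empty_box := by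
  intro height width character _
  exact empty_box_eq_alt height width character
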